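-- pv_equiv track=rewrite | github.com/joosu77/templates | ieee2022/python/tasks/palindrome_helper.py | good_formula
-- ===== SOURCE A (Python) =====
-- def good_formula(n, m):
--     if n == 0:
--         return 1
--     if n == 1:
--         return m
--     ans = m**n
--     for i in range(1, n - 1):
--         ans += good_formula(i, m) * m**(n-1) - m
--     ans += good_formula(n - 1, m) * (m - 1)
--     return ans
-- ===== SOURCE B (Python) =====
-- def good_formula(n, m):
--     # Bottom-up DP with a running prefix sum and running power of m:
--     # O(n) big-int operations instead of A's exponential recursion.
--     if n == 0:
--         return 1
--     prev = m   # value for 1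
--     s = 0      # sum of values for 1..k-2
--     q = m      # m**(k-1)
--     for k in range(2, n + 1):
--         p = q * m
--         prev, s, q = p + q * s - m * (k - 2) + prev * (m - 1), s + prev, p
--     return prev
-- ===== Notes on version B (the rewrite author's own statement) =====
-- stated objective: faster
-- what changed: Replaces A's exponential tree recursion with a single bottom-up pass that carries the previous value, a running prefix sum and a running power of m.
import Mathlib
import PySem

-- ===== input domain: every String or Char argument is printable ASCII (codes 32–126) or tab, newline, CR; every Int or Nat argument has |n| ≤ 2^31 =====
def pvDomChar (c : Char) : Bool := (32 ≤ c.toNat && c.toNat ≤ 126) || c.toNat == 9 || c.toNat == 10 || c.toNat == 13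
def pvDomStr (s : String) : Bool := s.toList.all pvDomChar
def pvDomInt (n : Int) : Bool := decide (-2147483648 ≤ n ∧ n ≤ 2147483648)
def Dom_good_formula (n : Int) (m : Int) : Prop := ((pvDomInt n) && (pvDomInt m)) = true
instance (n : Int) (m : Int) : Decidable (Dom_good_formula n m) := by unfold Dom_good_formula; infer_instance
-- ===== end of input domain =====

-- B changes A's exponential recursion into a single bottom-up pass (objective: faster).
-- ===== PORT A =====
-- A's recursion, on the (nonnegative, by Pre_) value of n; range(1, n-1) = List.range' 1 k for n = k+2.
def goodA : Nat → Int → Int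
  | 0, _ => 1
  | 1, m => m
  | (k+2), m =>
      ((List.range' 1 k).attach.foldl
        (fun ans i => ans + goodA i.1 m * m ^ (k + 1) - m) (m ^ (k + 2)))
      + goodA (k + 1) m * (m - 1)
termination_by n _ => n
decreasing_by
  · have := i.2
    have h := List.mem_range'.mp this
    omega
  · omega

def good_formula (n : Int) (m : Int) : Int := goodA n.toNat m

-- ===== PORT B =====
-- B's single loop over k = 2..n with state (prev, s, q) = (value at k-1, sum of values 1..k-2, m^(k-1)).
def goodBStep (m : Int) (st : Int × Int × Int) (k : Int) : Int × Int × Int :=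
  let p := st.2.2 * m
  (p + st.2.2 * st.2.1 - m * (k - 2) + st.1 * (m - 1), st.2.1 + st.1, p)

def good_formula_alt (n : Int) (m : Int) : Int :=
  if n = 0 then 1
  else
    ((PySem.List.pyRange 2 (n + 1) 1).foldl (goodBStep m) (m, 0, m)).1

-- ===== PRECONDITION & SPEC =====
-- Pre_ excludes n < 0, where Python A recurses without a base case (RecursionError).
def Pre_good_formula (n : Int) (m : Int) : Prop := 0 ≤ n
instance (n : Int) (m : Int) : Decidable (Pre_good_formula n m) := by unfold Pre_good_formula; infer_instance
def pvWitness_good_formula : Int × Int := (4, 3)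

def Spec_good_formula (n : Int) (m : Int) (out : Int) : Prop := out = good_formula_alt n m
instance (n : Int) (m : Int) (out : Int) : Decidable (Spec_good_formula n m out) := by unfold Spec_good_formula; infer_instance

-- ===== CLAIM (what is proved, stated in full; the proofs are below) =====
def Claim_equal_good_formula : Prop := ∀ (n : Int) (m : Int), Dom_good_formula n m → Pre_good_formula n m → Spec_good_formula n m (good_formula n m)

-- ===== LEMMAS AND PROOFS =====

-- A's inner loop is an affine fold: init + (sum of values)·c − m·len.
theorem foldA_eq (m c : Int) (l : List Nat) (init : Int) :
    l.foldl (fun ans i => ans + goodA i m * c - m) init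
      = init + (l.map (fun i => goodA i m)).sum * c - m * l.length := by
  induction l generalizing init with
  | nil => simp
  | cons x xs ih => simp [List.foldl_cons, ih]; ring

theorem goodA_unfold (k : Nat) (m : Int) :
    goodA (k + 2) m
      = m ^ (k + 2) + ((List.range' 1 k).map (fun i => goodA i m)).sum * m ^ (k + 1)
          - m * k + goodA (k + 1) m * (m - 1) := by
  rw [goodA]
  have : (List.range' 1 k).attach.foldl
      (fun ans i => ans + goodA i.1 m * m ^ (k + 1) - m) (m ^ (k + 2))
      = (List.range' 1 k).foldl
      (fun ans i => ans + goodA i m * m ^ (k + 1) - m) (m ^ (k + 2)) :=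
    List.foldl_attach (l := List.range' 1 k)
      (f := fun ans i => ans + goodA i m * m ^ (k + 1) - m) (b := m ^ (k + 2))
  rw [this, foldA_eq]
  simp

-- B's loop invariant: after consuming k = 2..t+1 the state is
-- (goodA (t+1), Σ_{i=1}^{t} goodA i, m^(t+1)).
theorem foldB_inv (m : Int) (t : Nat) :
    ((List.range t).map (fun k : Nat => ((2 : Int) + k))).foldl (goodBStep m) (m, 0, m)
      = (goodA (t + 1) m,
         ((List.range' 1 t).map (fun i => goodA i m)).sum,
         m ^ (t + 1)) := by
  induction t with
  | zero => simp [goodA, pow_one]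
  | succ t ih =>
    rw [List.range_succ, List.map_append, List.foldl_append, ih]
    simp only [List.map_cons, List.map_nil, List.foldl_cons, List.foldl_nil, goodBStep]
    rw [goodA_unfold, List.range'_1_concat]
    simp only [List.map_append, List.sum_append, List.map_cons, List.map_nil, List.sum_cons,
      List.sum_nil]
    simp only [Prod.mk.injEq, Nat.add_comm 1 t, add_zero]
    refine ⟨?_, ?_, ?_⟩ <;> first | trivial | ring

-- ===== VERDICT (by name: the statement is the Claim_ definition above) =====
theorem good_formula_spec : Claim_equal_good_formula := by
  intro n m _ hpre
  unfold Spec_good_formula good_formula good_formula_alt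
  by_cases h0 : n = 0
  · subst h0; simp [goodA]
  · have h1 : 1 ≤ n := by unfold Pre_good_formula at hpre; omega
    have hn : n ≠ 0 := h0
    rw [if_neg hn, PySem.List.pyRange_one]
    have ht : (n + 1 - 2).toNat = n.toNat - 1 := by omega
    rw [ht, foldB_inv]
    have : n.toNat - 1 + 1 = n.toNat := by omega
    rw [this]
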